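-- pv_equiv track=rewrite | github.com/KoYeJoon/coding_test_python | Programmers/level1/201222_42840.py | solution
-- ===== SOURCE A (Python) =====
-- def solution(answers):
--     answer = [0,0,0]
--     temp1 = [1,2,3,4,5]
--     temp2 = [2,1,2,3,2,4,2,5]
--     temp3 = [3,3,1,1,2,2,4,4,5,5]
--     for i in range(len(answers)) :
--         if temp1[i%5]==answers[i] :
--             answer[0] += 1
--         if temp2[i%8]==answers[i] :
--             answer[1] += 1
--         if temp3[i%10]==answers[i] :
--             answer[2] += 1
--     result = []
--     maxAns = max(answer)
--     for i in range(len(answer)):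
--         if maxAns == answer[i] :
--             result.append(i+1)
--     return result
-- ===== SOURCE B (Python) =====
-- def solution(answers):
--     # histogram over the lcm-40 cycle: (position mod 40, value) -> count
--     tab = {}
--     for i, a in enumerate(answers):
--         key = (i % 40, a)
--         tab[key] = tab.get(key, 0) + 1
--     pats = [[1, 2, 3, 4, 5], [2, 1, 2, 3, 2, 4, 2, 5], [3, 3, 1, 1, 2, 2, 4, 4, 5, 5]]
--     scores = [sum(tab.get((r, p[r % len(p)]), 0) for r in range(40)) for p in pats]
--     m = max(scores)
--     return [k + 1 for k in range(3) if scores[k] == m]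
-- ===== Notes on version B (the rewrite author's own statement) =====
-- stated objective: alternative
-- what changed: Instead of comparing each answer against all three patterns, B builds a histogram keyed by (index mod 40, value) in one pass (40 = lcm of the pattern periods) and derives each score as a fixed 40-term sum of histogram lookups.
import Mathlib
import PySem

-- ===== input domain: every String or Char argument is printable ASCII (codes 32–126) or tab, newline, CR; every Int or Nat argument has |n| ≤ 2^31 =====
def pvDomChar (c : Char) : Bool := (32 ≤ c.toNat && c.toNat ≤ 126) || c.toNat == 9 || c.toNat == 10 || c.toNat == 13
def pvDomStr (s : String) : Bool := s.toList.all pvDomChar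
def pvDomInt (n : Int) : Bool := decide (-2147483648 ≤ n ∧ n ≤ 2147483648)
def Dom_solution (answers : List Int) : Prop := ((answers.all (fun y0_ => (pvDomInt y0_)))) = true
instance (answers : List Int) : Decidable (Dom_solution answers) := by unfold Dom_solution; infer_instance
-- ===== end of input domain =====

-- B replaces A's per-element three-pattern comparison loop by a histogram keyed by (index mod 40, value)
-- plus fixed 40-term lookup sums; return value only, no speed claim.

-- ===== PORT A =====
-- one fused pass over range(len(answers)) updating the three counters of `answer`
def solution (answers : List Int) : List Int :=
  let temp1 : List Int := [1, 2, 3, 4, 5]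
  let temp2 : List Int := [2, 1, 2, 3, 2, 4, 2, 5]
  let temp3 : List Int := [3, 3, 1, 1, 2, 2, 4, 4, 5, 5]
  -- answer[0], answer[1], answer[2] kept as a triple; answers[i] is in range, so pyGetD is exact
  let answer : Int × Int × Int :=
    (PySem.List.pyRange 0 (answers.length : Int) 1).foldl
      (fun s i =>
        (if PySem.List.pyGetD temp1 (PySem.Int.mod i 5) 0 == PySem.List.pyGetD answers i 0 then s.1 + 1 else s.1,
         if PySem.List.pyGetD temp2 (PySem.Int.mod i 8) 0 == PySem.List.pyGetD answers i 0 then s.2.1 + 1 else s.2.1,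
         if PySem.List.pyGetD temp3 (PySem.Int.mod i 10) 0 == PySem.List.pyGetD answers i 0 then s.2.2 + 1 else s.2.2))
      (0, 0, 0)
  let answerL : List Int := [answer.1, answer.2.1, answer.2.2]
  let maxAns : Int := (PySem.List.max? answerL (fun x => x)).getD 0  -- list nonempty, so exact
  (PySem.List.pyRange 0 3 1).foldl
    (fun result i => if maxAns == PySem.List.pyGetD answerL i 0 then result ++ [i + 1] else result) []

-- ===== PORT B =====
-- tab[(i % 40, a)] += 1 over enumerate(answers); then each score is a 40-term sum of lookups
def solution_alt (answers : List Int) : List Int :=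
  let tab : PySem.Dict (Int × Int) Int :=
    (PySem.List.enumerate answers 0).foldl
      (fun d p => d.modify (PySem.Int.mod p.1 40, p.2) 0 (· + 1)) PySem.Dict.empty
  let pats : List (List Int) :=
    [[1, 2, 3, 4, 5], [2, 1, 2, 3, 2, 4, 2, 5], [3, 3, 1, 1, 2, 2, 4, 4, 5, 5]]
  let scores : List Int := pats.map (fun p =>
    ((PySem.List.pyRange 0 40 1).map
      (fun r => tab.getD (r, PySem.List.pyGetD p (PySem.Int.mod r (p.length : Int)) 0) 0)).sum)
  let m : Int := (PySem.List.max? scores (fun x => x)).getD 0  -- list nonempty, so exact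
  ((List.range 3).filter (fun k => scores.getD k 0 == m)).map (fun k => (k : Int) + 1)

-- ===== PRECONDITION & SPEC =====
def Spec_solution (answers : List Int) (out : List Int) : Prop := out = solution_alt answers
instance (answers : List Int) (out : List Int) : Decidable (Spec_solution answers out) := by unfold Spec_solution; infer_instance

-- ===== CLAIM (what is proved, stated in full; the proofs are below) =====
def Claim_equal_solution : Prop := ∀ (answers : List Int), Dom_solution answers → Spec_solution answers (solution answers)

-- ===== LEMMAS AND PROOFS =====

-- A's fused three-counter fold splits into three independent counts
theorem pv_foldl_triple (l : List Int) (p1 p2 p3 : Int → Bool) (a b c : Int) :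
    l.foldl (fun (s : Int × Int × Int) i =>
        (if p1 i then s.1 + 1 else s.1,
         if p2 i then s.2.1 + 1 else s.2.1,
         if p3 i then s.2.2 + 1 else s.2.2)) (a, b, c)
      = (a + (l.countP p1 : Int), b + (l.countP p2 : Int), c + (l.countP p3 : Int)) := by
  induction l generalizing a b c with
  | nil => simp
  | cons x t ih =>
    simp only [List.foldl_cons, List.countP_cons, ih]
    split_ifs <;> refine Prod.ext ?_ (Prod.ext ?_ ?_) <;> simp_all <;> omega

-- summing the indicator of the single matching residue over range(40)
theorem pv_indicator (x : Int × Int) (g : Int → Int) (h0 : 0 ≤ x.1) (h1 : x.1 < 40) :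
    ((PySem.List.pyRange 0 40 1).map
        (fun r => (if (r, g r) == x then (1 : Int) else 0))).sum
      = if x.2 == g x.1 then 1 else 0 := by
  rw [PySem.List.pyRange_one_append 0 x.1 40 h0 (by omega),
      PySem.List.pyRange_one_cons h1]
  simp only [List.map_append, List.map_cons, List.sum_append, List.sum_cons]
  have hz1 : ((PySem.List.pyRange 0 x.1 1).map
      (fun r => (if (r, g r) == x then (1 : Int) else 0))).sum = 0 := by
    apply List.sum_eq_zero
    intro y hy
    simp only [List.mem_map] at hy
    obtain ⟨r, hr, rfl⟩ := hy
    rw [PySem.List.mem_pyRange_one] at hr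
    have : (r, g r) ≠ x := by
      intro h; apply absurd (congrArg Prod.fst h); simp; omega
    simp [this]
  have hz2 : ((PySem.List.pyRange (x.1 + 1) 40 1).map
      (fun r => (if (r, g r) == x then (1 : Int) else 0))).sum = 0 := by
    apply List.sum_eq_zero
    intro y hy
    simp only [List.mem_map] at hy
    obtain ⟨r, hr, rfl⟩ := hy
    rw [PySem.List.mem_pyRange_one] at hr
    have : (r, g r) ≠ x := by
      intro h; apply absurd (congrArg Prod.fst h); simp; omega
    simp [this]
  rw [hz1, hz2]
  have : ((x.1, g x.1) == x) = (x.2 == g x.1) := by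
    rcases x with ⟨a, b⟩
    simp [Prod.ext_iff, eq_comm]
  rw [this]
  ring

-- the 40 histogram lookups for g add up to one count over the whole key list
theorem pv_sum_count (M : List (Int × Int)) (g : Int → Int)
    (hM : ∀ q ∈ M, 0 ≤ q.1 ∧ q.1 < 40) :
    ((PySem.List.pyRange 0 40 1).map
        (fun r => ((M.count (r, g r) : Nat) : Int))).sum
      = (M.countP (fun q => q.2 == g q.1) : Int) := by
  induction M with
  | nil => simp
  | cons x t ih =>
    have hx := hM x (by simp)
    have ht : ∀ q ∈ t, 0 ≤ q.1 ∧ q.1 < 40 := fun q hq => hM q (by simp [hq])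
    have hcnt : (fun r => (((x :: t).count (r, g r) : Nat) : Int))
        = fun r => ((t.count (r, g r) : Nat) : Int) + (if (r, g r) == x then (1 : Int) else 0) := by
      funext r
      rw [List.count_cons]
      push_cast
      rw [BEq.comm]
    rw [hcnt]
    rw [PySem.List.sum_map_add_int]
    rw [ih ht, pv_indicator x g hx.1 hx.2]
    rw [List.countP_cons]
    push_cast
    ring

-- the keyed counting loop is a histogram: each lookup is a count in the mapped key list
theorem pv_getD_keyed (l : List (Int × Int)) (f : Int × Int → Int × Int)
    (d : PySem.Dict (Int × Int) Int) (v : Int × Int) :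
    (l.foldl (fun d p => d.modify (f p) 0 (· + 1)) d).getD v 0
      = d.getD v 0 + ((l.map f).count v : Int) := by
  induction l generalizing d with
  | nil => simp
  | cons x t ih =>
    simp only [List.foldl_cons, List.map_cons, List.count_cons, ih, PySem.Dict.getD_modify]
    by_cases h : v = f x
    · rw [if_pos h, if_pos (by simp [h])]
      push_cast
      rw [h]
      ring
    · rw [if_neg h, if_neg (by simp [beq_iff_eq]; exact fun e => h e.symm)]
      push_cast
      ring

-- B's 40-term lookup sum for a pattern equals A's per-index count for that pattern
theorem pv_score_eq (answers pat : List Int) (hL : 0 < pat.length)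
    (hdvd : ((pat.length : Nat) : Int) ∣ 40) :
    ((PySem.List.pyRange 0 40 1).map
        (fun r => ((((PySem.List.enumerate answers 0).map
              (fun p => (PySem.Int.mod p.1 40, p.2))).count
            (r, PySem.List.pyGetD pat (PySem.Int.mod r (pat.length : Int)) 0) : Nat) : Int))).sum
      = ((PySem.List.pyRange 0 (answers.length : Int) 1).countP
          (fun i => PySem.List.pyGetD pat (PySem.Int.mod i (pat.length : Int)) 0
                      == PySem.List.pyGetD answers i 0) : Int) := by
  set g : Int → Int := fun r => PySem.List.pyGetD pat (PySem.Int.mod r (pat.length : Int)) 0 with hg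
  have h40 : (0 : Int) < 40 := by norm_num
  have hLpos : (0 : Int) < (pat.length : Int) := by exact_mod_cast hL
  have hM : ∀ q ∈ (PySem.List.enumerate answers 0).map (fun p => (PySem.Int.mod p.1 40, p.2)),
      0 ≤ q.1 ∧ q.1 < 40 := by
    intro q hq
    simp only [List.mem_map] at hq
    obtain ⟨p, _, rfl⟩ := hq
    exact ⟨PySem.Int.mod_nonneg p.1 h40, PySem.Int.mod_lt p.1 h40⟩
  rw [pv_sum_count _ g hM]
  rw [List.countP_map]
  rw [PySem.List.enumerate_eq_map_pyRange (d := 0), List.countP_map]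
  congr 1
  apply List.countP_congr
  intro j hj
  rw [PySem.List.mem_pyRange_one] at hj
  simp only [Function.comp, hg]
  have hmm : PySem.Int.mod (PySem.Int.mod j 40) (pat.length : Int) = PySem.Int.mod j (pat.length : Int) := by
    rw [PySem.Int.mod_eq_emod_of_pos h40, PySem.Int.mod_eq_emod_of_pos hLpos,
        PySem.Int.mod_eq_emod_of_pos hLpos]
    exact Int.emod_emod_of_dvd j hdvd
  rw [hmm, BEq.comm]

theorem solution_eq_alt (answers : List Int) : solution answers = solution_alt answers := by
  simp only [solution, solution_alt]
  rw [pv_foldl_triple]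
  simp only [List.map_cons, List.map_nil, pv_getD_keyed, PySem.Dict.getD_empty, zero_add]
  rw [pv_score_eq answers [1, 2, 3, 4, 5] (by simp) (by norm_num),
      pv_score_eq answers [2, 1, 2, 3, 2, 4, 2, 5] (by simp) (by norm_num),
      pv_score_eq answers [3, 3, 1, 1, 2, 2, 4, 4, 5, 5] (by simp) (by norm_num)]
  simp only [List.length_cons, List.length_nil]
  norm_num
  generalize (PySem.List.pyRange 0 (answers.length : Int) 1).countP _ = c1
  generalize (PySem.List.pyRange 0 (answers.length : Int) 1).countP _ = c2
  generalize (PySem.List.pyRange 0 (answers.length : Int) 1).countP _ = c3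
  have h3 : PySem.List.pyRange 0 3 1 = [0, 1, 2] := by decide
  rw [h3]
  simp only [List.foldl_cons, List.foldl_nil, List.range, List.range.loop, List.filter_cons, List.filter_nil]
  simp only [PySem.List.pyGetD_ofNat', beq_iff_eq]
  generalize (PySem.List.max? [(c1 : Int), (c2 : Int), (c3 : Int)] fun x => x).getD 0 = m
  by_cases h1 : m = (c1 : Int) <;> by_cases h2 : m = (c2 : Int) <;> by_cases h3' : m = (c3 : Int) <;>
    simp_all <;> simp_all [eq_comm]

-- ===== VERDICT (by name: the statement is the Claim_ definition above) =====
theorem solution_spec : Claim_equal_solution := by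
  intro answers _
  unfold Spec_solution
  exact solution_eq_alt answers
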